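-- pv_equiv track=rewrite | github.com/reynoldscem/aoc2018 | day04/2.py | split_shifts
-- ===== SOURCE A (Python) =====
-- def split_shifts(list_of_events):
--     chunk = []
--     for line in list_of_events:
--         if 'Guard' in line and len(chunk) >= 1:
--             yield chunk
--             chunk = [line]
--         else:
--             chunk.append(line)
--     yield chunk
-- ===== SOURCE B (Python) =====
-- def split_shifts(list_of_events):
--     bounds = [i for i, line in enumerate(list_of_events) if i > 0 and 'Guard' in line]
--     cuts = [0] + bounds + [len(list_of_events)]
--     for start, stop in zip(cuts, cuts[1:]):
--         yield list_of_events[start:stop]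
-- ===== Notes on version B (the rewrite author's own statement) =====
-- stated objective: alternative
-- what changed: B first collects the Guard-line boundary indices in one pass and then yields slices between consecutive cut points, instead of A's element-by-element chunk accumulator.
import Mathlib
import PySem

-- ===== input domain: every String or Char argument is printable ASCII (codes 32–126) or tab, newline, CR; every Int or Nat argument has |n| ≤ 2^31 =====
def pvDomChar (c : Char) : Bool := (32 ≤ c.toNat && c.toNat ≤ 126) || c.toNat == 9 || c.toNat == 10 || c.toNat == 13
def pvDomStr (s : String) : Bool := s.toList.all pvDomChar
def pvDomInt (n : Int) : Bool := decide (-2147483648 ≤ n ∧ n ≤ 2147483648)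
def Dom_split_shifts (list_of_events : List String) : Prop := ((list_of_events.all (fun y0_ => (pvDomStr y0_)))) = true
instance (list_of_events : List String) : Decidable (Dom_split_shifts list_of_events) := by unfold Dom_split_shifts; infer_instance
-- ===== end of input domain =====

-- B replaces A's element-by-element chunk accumulator by a boundary-index pass
-- followed by slicing between consecutive cut points (alternative decomposition; return value compared as a list of chunks).

-- ===== PORT A =====
-- A: fold over the lines with state (finished chunks, current chunk); close the chunk
-- before a non-first 'Guard' line; the trailing chunk is always yielded.
def split_shifts (list_of_events : List String) : List (List String) :=
  let st := list_of_events.foldl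
    (fun (st : List (List String) × List String) line =>
      if PySem.Str.isIn "Guard" line && decide (1 ≤ st.2.length)
      then (st.1 ++ [st.2], [line])
      else (st.1, st.2 ++ [line]))
    ([], [])
  st.1 ++ [st.2]

-- ===== PORT B =====
-- B: boundary indices (i > 0 with 'Guard' in line), cut points 0 :: bounds ++ [len],
-- then one slice per consecutive pair of cut points.
def split_shifts_alt (list_of_events : List String) : List (List String) :=
  let bounds : List Int :=
    ((PySem.List.enumerate list_of_events).filter
      (fun p => decide (0 < p.1) && PySem.Str.isIn "Guard" p.2)).map (·.1)
  let cuts : List Int := 0 :: (bounds ++ [(list_of_events.length : Int)])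
  (cuts.zip cuts.tail).map
    (fun p => PySem.List.slice list_of_events (some p.1) (some p.2))

-- ===== PRECONDITION & SPEC =====
def Spec_split_shifts (list_of_events : List String) (out : List (List String)) : Prop := out = split_shifts_alt list_of_events
instance (list_of_events : List String) (out : List (List String)) : Decidable (Spec_split_shifts list_of_events out) := by unfold Spec_split_shifts; infer_instance

-- ===== CLAIM (what is proved, stated in full; the proofs are below) =====
def Claim_equal_split_shifts : Prop := ∀ (list_of_events : List String), Dom_split_shifts list_of_events → Spec_split_shifts list_of_events (split_shifts list_of_events)

-- ===== LEMMAS AND PROOFS =====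

-- guard-line indices of ys, counted from offset a
def gIdx (ys : List String) (a : Int) : List Int :=
  match ys with
  | [] => []
  | y :: ys => if PySem.Str.isIn "Guard" y then a :: gIdx ys (a + 1) else gIdx ys (a + 1)

-- slices of l between consecutive cut points, starting at a
def slicesAt (l : List String) (a : Int) : List Int → List (List String)
  | [] => []
  | b :: bs => PySem.List.slice l (some a) (some b) :: slicesAt l b bs

-- prepend c to the first chunk
def prependFirst (c : List String) : List (List String) → List (List String)
  | [] => [c]
  | h :: t => (c ++ h) :: t

-- B's chunking of a suffix, cut at every guard index (offset 0) and the end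
def Sfun (ys : List String) : List (List String) :=
  slicesAt ys 0 (gIdx ys 0 ++ [(ys.length : Int)])

theorem prependFirst_prependFirst (c d : List String) (L : List (List String)) :
    prependFirst c (prependFirst d L) = prependFirst (c ++ d) L := by
  cases L <;> simp [prependFirst]

theorem gIdx_nonneg (ys : List String) (a : Int) (h : 0 ≤ a) :
    ∀ b ∈ gIdx ys a, 0 ≤ b := by
  induction ys generalizing a with
  | nil => simp [gIdx]
  | cons y ys ih =>
    intro b hb
    simp only [gIdx] at hb
    split at hb
    · rcases List.mem_cons.1 hb with rfl | hb
      · exact h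
      · exact ih (a + 1) (by omega) b hb
    · exact ih (a + 1) (by omega) b hb

theorem gIdx_shift (ys : List String) (a : Int) :
    gIdx ys (a + 1) = (gIdx ys a).map (· + 1) := by
  induction ys generalizing a with
  | nil => simp [gIdx]
  | cons y ys ih =>
    simp only [gIdx]
    split <;> simp [ih]

theorem slice_shift (y : String) (ys : List String) (a b : Int) (ha : 0 ≤ a) (hb : 0 ≤ b) :
    PySem.List.slice (y :: ys) (some (a + 1)) (some (b + 1)) = PySem.List.slice ys (some a) (some b) := by
  rw [PySem.List.slice_toNat _ (by omega) (by omega), PySem.List.slice_toNat _ ha hb]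
  have h1 : (a + 1).toNat = a.toNat + 1 := by omega
  rw [h1]
  have h2 : (b + 1).toNat - (a.toNat + 1) = b.toNat - a.toNat := by omega
  rw [h2, List.drop_succ_cons]

theorem slice_zero_succ (y : String) (ys : List String) (b : Int) (hb : 0 ≤ b) :
    PySem.List.slice (y :: ys) (some 0) (some (b + 1)) = y :: PySem.List.slice ys (some 0) (some b) := by
  rw [PySem.List.slice_toNat _ (by omega) (by omega), PySem.List.slice_toNat _ le_rfl hb]
  have h1 : (b + 1).toNat = b.toNat + 1 := by omega
  simp [h1]

theorem slicesAt_shift (y : String) (ys : List String) (bs : List Int) (a : Int)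
    (ha : 0 ≤ a) (hbs : ∀ b ∈ bs, 0 ≤ b) :
    slicesAt (y :: ys) (a + 1) (bs.map (· + 1)) = slicesAt ys a bs := by
  induction bs generalizing a with
  | nil => simp [slicesAt]
  | cons b bs ih =>
    have hb : 0 ≤ b := hbs b (by simp)
    simp only [List.map_cons, slicesAt]
    rw [slice_shift y ys a b ha hb, ih b hb (fun c hc => hbs c (by simp [hc]))]

theorem slicesAt_cons_first (y : String) (ys : List String) (bs : List Int)
    (hbs : ∀ b ∈ bs, 0 ≤ b) :
    slicesAt (y :: ys) 0 ((bs ++ [(ys.length : Int)]).map (· + 1)) =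
      prependFirst [y] (slicesAt ys 0 (bs ++ [(ys.length : Int)])) := by
  induction bs with
  | nil =>
    simp only [List.nil_append, List.map_cons, List.map_nil, slicesAt, prependFirst]
    rw [slice_zero_succ y ys _ (by positivity)]
    simp
  | cons b bs ih =>
    have hb : 0 ≤ b := hbs b (by simp)
    simp only [List.cons_append, List.map_cons, slicesAt, prependFirst]
    rw [slice_zero_succ y ys b hb]
    have hshift := slicesAt_shift y ys (bs ++ [(ys.length : Int)]) b hb
      (by intro c hc; rcases List.mem_append.1 hc with h | h
          · exact hbs c (by simp [h])
          · simp at h; omega)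
    rw [hshift]
    simp

theorem Sfun_nil : Sfun [] = [[]] := by decide

theorem Sfun_cons (y : String) (ys : List String) :
    Sfun (y :: ys) =
      if PySem.Str.isIn "Guard" y then [] :: prependFirst [y] (Sfun ys)
      else prependFirst [y] (Sfun ys) := by
  have hnn := gIdx_nonneg ys 0 le_rfl
  have hlen : ((y :: ys).length : Int) = (ys.length : Int) + 1 := by simp
  have hkey : gIdx ys (0 + 1) ++ [(ys.length : Int) + 1] = ((gIdx ys 0 ++ [(ys.length : Int)]).map (· + 1)) := by
    rw [List.map_append]
    have : gIdx ys (0 + 1) = (gIdx ys 0).map (· + 1) := gIdx_shift ys 0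
    simp only [zero_add] at this
    simp [this]
  unfold Sfun
  simp only [gIdx, hlen]
  split
  · simp only [List.cons_append, slicesAt]
    have h0 : PySem.List.slice (y :: ys) (some 0) (some 0) = [] := by
      rw [PySem.List.slice_toNat _ le_rfl le_rfl]; simp
    rw [h0, hkey, slicesAt_cons_first y ys _ hnn]
  · rw [hkey, slicesAt_cons_first y ys _ hnn]

-- A's fold, from an arbitrary state with a non-empty current chunk
theorem foldA (ys : List String) : ∀ (acc : List (List String)) (c : List String), c ≠ [] →
    (let st := ys.foldl
        (fun (st : List (List String) × List String) line =>
          if PySem.Str.isIn "Guard" line && decide (1 ≤ st.2.length)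
          then (st.1 ++ [st.2], [line])
          else (st.1, st.2 ++ [line]))
        (acc, c)
     st.1 ++ [st.2]) = acc ++ prependFirst c (Sfun ys) := by
  induction ys with
  | nil =>
    intro acc c hc
    simp [Sfun_nil, prependFirst]
  | cons y ys ih =>
    intro acc c hc
    have hlen : decide (1 ≤ c.length) = true := by
      rcases c with _ | ⟨h, t⟩
      · exact absurd rfl hc
      · simp
    simp only [List.foldl_cons, hlen, Bool.and_true, Sfun_cons]
    by_cases hg : PySem.Str.isIn "Guard" y
    · simp only [hg, if_true]
      rw [ih (acc ++ [c]) [y] (by simp)]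
      simp [prependFirst, List.append_assoc]
    · simp only [hg, Bool.false_eq_true, if_false]
      rw [ih acc (c ++ [y]) (by simp)]
      rw [← prependFirst_prependFirst, prependFirst_prependFirst]

theorem bounds_eq (ys : List String) : ∀ (s : Int), 1 ≤ s →
    ((PySem.List.enumerate ys s).filter
      (fun p => decide (0 < p.1) && PySem.Str.isIn "Guard" p.2)).map (·.1) = gIdx ys s := by
  induction ys with
  | nil => intro s hs; simp [PySem.List.enumerate_nil, gIdx]
  | cons y ys ih =>
    intro s hs
    rw [PySem.List.enumerate_cons]
    have hpos : decide (0 < s) = true := by simp; omega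
    simp only [List.filter_cons, hpos, Bool.true_and, gIdx]
    split
    · simp only [List.map_cons]
      rw [ih (s + 1) (by omega)]
    · rw [ih (s + 1) (by omega)]

theorem zip_map_slicesAt (l : List String) : ∀ (cs : List Int) (a : Int),
    (((a :: cs).zip cs).map (fun p => PySem.List.slice l (some p.1) (some p.2))) = slicesAt l a cs := by
  intro cs
  induction cs with
  | nil => intro a; simp [slicesAt]
  | cons b bs ih => intro a; simp only [List.zip_cons_cons, List.map_cons, slicesAt, ih b]

theorem alt_eq_Sfun (l : List String) :
    split_shifts_alt l = match l with
      | [] => [[]]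
      | x :: xs => prependFirst [x] (Sfun xs) := by
  cases l with
  | nil => decide
  | cons x xs =>
    unfold split_shifts_alt
    rw [PySem.List.enumerate_cons]
    simp only [List.filter_cons]
    have h0 : (decide ((0:Int) < 0) && PySem.Str.isIn "Guard" x) = false := by simp
    rw [h0]
    simp only [Bool.false_eq_true, if_false]
    rw [bounds_eq xs (0 + 1) (by omega)]
    simp only [List.tail_cons]
    rw [zip_map_slicesAt (x :: xs) (gIdx xs (0 + 1) ++ [((x :: xs).length : Int)]) 0]
    have hlen : ((x :: xs).length : Int) = (xs.length : Int) + 1 := by simp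
    have hkey : gIdx xs (0 + 1) ++ [((x :: xs).length : Int)] =
        ((gIdx xs 0 ++ [(xs.length : Int)]).map (· + 1)) := by
      rw [List.map_append, hlen]
      have := gIdx_shift xs 0
      simp only [zero_add] at this ⊢
      simp [this]
    rw [hkey, slicesAt_cons_first x xs _ (gIdx_nonneg xs 0 le_rfl)]
    rfl

-- ===== VERDICT (by name: the statement is the Claim_ definition above) =====
theorem split_shifts_spec : Claim_equal_split_shifts := by
  intro l _
  unfold Spec_split_shifts split_shifts
  rw [alt_eq_Sfun l]
  cases l with
  | nil => decide
  | cons x xs =>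
    simp only [List.foldl_cons]
    have h1 : (PySem.Str.isIn "Guard" x && decide (1 ≤ ([] : List String).length)) = false := by simp
    rw [h1]
    simp only [Bool.false_eq_true, if_false, List.nil_append]
    exact foldA xs [] [x] (by simp)
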